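-- pv_equiv track=rewrite | github.com/Jonathan-Challenger/PythonSkills | Arrays/evenDigits.py | even_digits
-- ===== SOURCE A (Python) =====
-- def even_digits(arr):
--     count = 0
--     lens = []
--
--     for i in range(len(arr)):
--         lens.append(len(str(i)))
--         for n in lens:
--             if n % 2 == 0:
--                 count += 1
--     return count
-- ===== SOURCE B (Python) =====
-- def even_digits(arr):
--     n = len(arr)
--     count = 0
--     for j in range(n):
--         if len(str(j)) % 2 == 0:
--             count += n - j
--     return count
-- ===== Notes on version B (the rewrite author's own statement) =====
-- stated objective: faster
-- what changed: Replaced A's growing lens list with an O(n^2) inner rescan by a single pass that adds the closed-form weight (n - j) for each even-digit-length index j, maintaining only an integer counter.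
import Mathlib
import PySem

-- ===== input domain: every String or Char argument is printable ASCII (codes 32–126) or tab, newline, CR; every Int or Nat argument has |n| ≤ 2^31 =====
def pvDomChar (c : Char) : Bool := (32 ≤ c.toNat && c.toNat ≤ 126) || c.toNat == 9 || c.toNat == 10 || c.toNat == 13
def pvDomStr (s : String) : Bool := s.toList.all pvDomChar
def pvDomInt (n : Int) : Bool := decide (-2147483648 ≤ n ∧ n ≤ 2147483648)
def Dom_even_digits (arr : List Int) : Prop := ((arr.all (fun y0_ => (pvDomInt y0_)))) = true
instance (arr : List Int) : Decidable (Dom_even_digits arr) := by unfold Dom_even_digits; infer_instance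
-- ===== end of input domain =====

-- B replaces A's quadratic rescan of a growing lens list by a single pass adding the
-- closed-form weight (n - j) per even-digit-length index j (objective: faster).

-- ===== PORT A =====
def even_digits (arr : List Int) : Int :=
  ((PySem.List.pyRange 0 arr.length 1).foldl
    (fun (st : Int × List Int) i =>
      let lens := st.2 ++ [((PySem.Int.toStr i).length : Int)]
      let count := lens.foldl (fun c n => if n % 2 == 0 then c + 1 else c) st.1
      (count, lens)) ((0 : Int), ([] : List Int))).1

-- ===== PORT B =====
def even_digits_alt (arr : List Int) : Int :=
  let n : Int := arr.length
  (PySem.List.pyRange 0 n 1).foldl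
    (fun count j =>
      if ((PySem.Int.toStr j).length : Int) % 2 == 0 then count + (n - j) else count) 0

-- ===== PRECONDITION & SPEC =====
def Spec_even_digits (arr : List Int) (out : Int) : Prop := out = even_digits_alt arr
instance (arr : List Int) (out : Int) : Decidable (Spec_even_digits arr out) := by unfold Spec_even_digits; infer_instance

-- ===== CLAIM (what is proved, stated in full; the proofs are below) =====
def Claim_equal_even_digits : Prop := ∀ (arr : List Int), Dom_even_digits arr → Spec_even_digits arr (even_digits arr)

-- ===== LEMMAS AND PROOFS =====

-- eD j = 1 if str(j) has even length, else 0
def eD (j : Int) : Int := if ((PySem.Int.toStr j).length : Int) % 2 == 0 then 1 else 0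

-- cC k = number of even-length entries among str(0)..str(k-1)
def cC : Nat → Int
  | 0 => 0
  | k+1 => cC k + eD k

-- the lens list after k iterations of A
def lensL (k : Nat) : List Int := (List.range k).map (fun j => ((PySem.Int.toStr (j : Int)).length : Int))

-- A's state after k iterations
def aF : Nat → Int × List Int
  | 0 => (0, [])
  | k+1 =>
      let p := aF k
      let lens := p.2 ++ [((PySem.Int.toStr (k : Int)).length : Int)]
      (lens.foldl (fun c n => if n % 2 == 0 then c + 1 else c) p.1, lens)

-- B's accumulator after k iterations (n fixed)
def bF (n : Int) : Nat → Int
  | 0 => 0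
  | k+1 =>
      if ((PySem.Int.toStr (k : Int)).length : Int) % 2 == 0
      then bF n k + (n - k) else bF n k

theorem cnt_foldl (k : Nat) (s : Int) :
    (lensL k).foldl (fun c n => if n % 2 == 0 then c + 1 else c) s = s + cC k := by
  induction k generalizing s with
  | zero => simp [lensL, cC]
  | succ k ih =>
      have h : lensL (k+1) = lensL k ++ [((PySem.Int.toStr (k : Int)).length : Int)] := by
        simp [lensL, List.range_succ]
      rw [h, List.foldl_append, ih]
      simp only [List.foldl_cons, List.foldl_nil, cC, eD]
      split <;> ring

theorem aF_snd (k : Nat) : (aF k).2 = lensL k := by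
  induction k with
  | zero => simp [aF, lensL]
  | succ k ih => simp [aF, ih, lensL, List.range_succ]

theorem aF_fold (n : Nat) :
    (PySem.List.pyRange 0 n 1).foldl
      (fun (st : Int × List Int) i =>
        let lens := st.2 ++ [((PySem.Int.toStr i).length : Int)]
        let count := lens.foldl (fun c n => if n % 2 == 0 then c + 1 else c) st.1
        (count, lens)) ((0 : Int), ([] : List Int)) = aF n := by
  induction n with
  | zero => simp [aF]
  | succ n ih =>
      have h : PySem.List.pyRange 0 ((n+1 : Nat) : Int) 1
             = PySem.List.pyRange 0 (n : Int) 1 ++ [(n : Int)] := by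
        have := PySem.List.pyRange_one_succ_right (a := 0) (b := (n : Int)) (by positivity)
        rw [← this]; norm_num
      rw [h, List.foldl_append, ih]
      simp [aF]

theorem bF_fold (m : Int) (n : Nat) :
    (PySem.List.pyRange 0 (n : Int) 1).foldl
      (fun count j =>
        if ((PySem.Int.toStr j).length : Int) % 2 == 0 then count + (m - j) else count) 0
    = bF m n := by
  induction n with
  | zero => simp [bF]
  | succ n ih =>
      have h : PySem.List.pyRange 0 ((n+1 : Nat) : Int) 1
             = PySem.List.pyRange 0 (n : Int) 1 ++ [(n : Int)] := by
        have := PySem.List.pyRange_one_succ_right (a := 0) (b := (n : Int)) (by positivity)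
        rw [← this]; norm_num
      rw [h, List.foldl_append, ih]
      simp [bF]

theorem bF_shift (m : Int) (k : Nat) : bF (m + 1) k = bF m k + cC k := by
  induction k with
  | zero => simp [bF, cC]
  | succ k ih =>
      simp only [bF, cC, eD, ih]
      split <;> ring

theorem aF_eq_bF (n : Nat) : (aF n).1 = bF (n : Int) n := by
  induction n with
  | zero => simp [aF, bF]
  | succ n ih =>
      have h1 : (aF (n+1)).1 = (aF n).1 + cC (n+1) := by
        simp only [aF]
        rw [show (aF n).2 ++ [((PySem.Int.toStr (n : Int)).length : Int)]
              = lensL (n+1) by rw [aF_snd]; simp [lensL, List.range_succ]]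
        exact cnt_foldl (n+1) (aF n).1
      have h2 : ((n+1 : Nat) : Int) = (n : Int) + 1 := by push_cast; ring
      rw [h1, ih, h2, bF]
      rw [bF_shift]
      simp only [cC, eD]
      split <;> ring

-- ===== VERDICT (by name: the statement is the Claim_ definition above) =====
theorem even_digits_spec : Claim_equal_even_digits := by
  intro arr _
  unfold Spec_even_digits even_digits even_digits_alt
  rw [aF_fold, bF_fold, aF_eq_bF]
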